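-- pv_equiv track=rewrite | github.com/drmikehenry/findx | src/findx.py | double_quoted
-- ===== SOURCE A (Python) =====
-- def double_quoted(s: str) -> str:
--     bslash = "\\"
--     bslash_count = 0
--     parts = []
--     for c in s:
--         if c == bslash:
--             bslash_count += 1
--         else:
--             if c == '"':
--                 bslash_count = 2 * bslash_count + 1
--             parts.append(bslash * bslash_count + c)
--             bslash_count = 0
--     parts.append(bslash * bslash_count * 2)
--     return '"%s"' % ("".join(parts))
-- ===== SOURCE B (Python) =====
-- def double_quoted(s: str) -> str:
--     # Right-to-left single pass: a backslash is doubled iff only backslashes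
--     # stand between it and a double quote or the end of the string.
--     out = []
--     esc = True  # at the right end, backslashes precede the closing quote
--     for c in reversed(s):
--         if c == '"':
--             out.append('\\"')
--             esc = True
--         elif c == '\\':
--             out.append('\\\\' if esc else '\\')
--         else:
--             out.append(c)
--             esc = False
--     return '"' + ''.join(reversed(out)) + '"'
-- ===== Notes on version B (the rewrite author's own statement) =====
-- stated objective: alternative
-- what changed: Replaced the left-to-right scan that accumulates a backslash run counter with a single right-to-left pass carrying one boolean flag (a backslash is doubled iff it is followed only by backslashes up to a quote or the end), so no counter or run bookkeeping remains.
import Mathlib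
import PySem

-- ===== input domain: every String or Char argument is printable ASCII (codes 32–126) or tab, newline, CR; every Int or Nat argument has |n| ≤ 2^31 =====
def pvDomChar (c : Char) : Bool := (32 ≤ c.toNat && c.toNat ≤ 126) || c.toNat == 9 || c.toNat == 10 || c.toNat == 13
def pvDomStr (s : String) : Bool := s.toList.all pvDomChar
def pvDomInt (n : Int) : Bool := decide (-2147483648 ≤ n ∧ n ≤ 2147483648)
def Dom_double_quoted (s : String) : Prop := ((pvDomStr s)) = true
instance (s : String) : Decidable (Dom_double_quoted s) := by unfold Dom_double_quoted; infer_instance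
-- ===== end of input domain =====

-- B replaces A's left-to-right backslash-run counter by one right-to-left pass with a boolean escape flag (alternative, same cost).

-- ===== PORT A =====
-- state: (bslash_count, parts); '\\' * k is List.replicate k '\\' (exact: the count is a nonnegative run length)
def dqA_step (st : Nat × List (List Char)) (c : Char) : Nat × List (List Char) :=
  if c = '\\' then (st.1 + 1, st.2)
  else
    let k := if c = '"' then 2 * st.1 + 1 else st.1
    (0, st.2 ++ [List.replicate k '\\' ++ [c]])

def double_quoted (s : String) : String :=
  String.ofList ('"' ::
    ((s.toList.foldl dqA_step (0, [])).2
      ++ [List.replicate ((s.toList.foldl dqA_step (0, [])).1 * 2) '\\']).flatten ++ ['"'])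

-- ===== PORT B =====
-- state: (esc flag, out pieces); iterates the reversed string, output joined in reverse
def dqB_step (st : Bool × List (List Char)) (c : Char) : Bool × List (List Char) :=
  if c = '"' then (true, st.2 ++ [['\\', '"']])
  else if c = '\\' then (st.1, st.2 ++ [if st.1 then ['\\', '\\'] else ['\\']])
  else (false, st.2 ++ [[c]])

def double_quoted_alt (s : String) : String :=
  String.ofList ('"' :: (s.toList.reverse.foldl dqB_step (true, [])).2.reverse.flatten ++ ['"'])

-- ===== PRECONDITION & SPEC =====
def Spec_double_quoted (s : String) (out : String) : Prop := out = double_quoted_alt s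
instance (s : String) (out : String) : Decidable (Spec_double_quoted s out) := by unfold Spec_double_quoted; infer_instance

-- ===== CLAIM (what is proved, stated in full; the proofs are below) =====
def Claim_equal_double_quoted : Prop := ∀ (s : String), Dom_double_quoted s → Spec_double_quoted s (double_quoted s)

-- ===== LEMMAS AND PROOFS =====

-- recursive characterisation of A's loop
def runA : List Char → Nat → List (List Char)
  | [], k => [List.replicate (k * 2) '\\']
  | c :: rest, k =>
    if c = '\\' then runA rest (k + 1)
    else (List.replicate (if c = '"' then 2 * k + 1 else k) '\\' ++ [c]) :: runA rest 0

theorem foldlA (l : List Char) : ∀ (k : Nat) (acc : List (List Char)),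
    (l.foldl dqA_step (k, acc)).2 ++ [List.replicate ((l.foldl dqA_step (k, acc)).1 * 2) '\\']
      = acc ++ runA l k := by
  induction l with
  | nil => intro k acc; simp [runA]
  | cons c rest ih =>
    intro k acc
    by_cases hb : c = '\\'
    · simp [dqA_step, runA, hb, ih]
    · by_cases hq : c = '"' <;> simp [dqA_step, runA, hb, hq, ih]

-- recursive characterisation of B's loop (over the reversed string)
def revB : List Char → Bool → List (List Char) × Bool
  | [], esc => ([], esc)
  | c :: rest, esc =>
    if c = '"' then
      let r := revB rest true
      (['\\', '"'] :: r.1, r.2)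
    else if c = '\\' then
      let r := revB rest esc
      ((if esc then ['\\', '\\'] else ['\\']) :: r.1, r.2)
    else
      let r := revB rest false
      ([c] :: r.1, r.2)

theorem foldlB (l : List Char) : ∀ (esc : Bool) (acc : List (List Char)),
    l.foldl dqB_step (esc, acc) = ((revB l esc).2, acc ++ (revB l esc).1) := by
  induction l with
  | nil => intro esc acc; simp [revB]
  | cons c rest ih =>
    intro esc acc
    by_cases hq : c = '"'
    · simp [dqB_step, revB, hq, ih]
    · by_cases hb : c = '\\' <;> simp [dqB_step, revB, hq, hb, ih]

theorem revB_append (xs ys : List Char) : ∀ (esc : Bool),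
    revB (xs ++ ys) esc
      = ((revB xs esc).1 ++ (revB ys (revB xs esc).2).1, (revB ys (revB xs esc).2).2) := by
  induction xs with
  | nil => intro esc; simp [revB]
  | cons c rest ih =>
    intro esc
    by_cases hq : c = '"'
    · simp [revB, hq, ih]
    · by_cases hb : c = '\\' <;> simp [revB, hq, hb, ih]

-- the common reference: left-structural right-to-left transform (output, esc-flag at the left end)
def gRef : List Char → List Char × Bool
  | [] => ([], true)
  | c :: rest =>
    let r := gRef rest
    if c = '"' then ('\\' :: '"' :: r.1, true)
    else if c = '\\' then ((if r.2 then ['\\', '\\'] else ['\\']) ++ r.1, r.2)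
    else (c :: r.1, false)

theorem revB_gRef (l : List Char) :
    (revB l.reverse true).1.reverse.flatten = (gRef l).1 ∧ (revB l.reverse true).2 = (gRef l).2 := by
  induction l with
  | nil => simp [revB, gRef]
  | cons c rest ih =>
    obtain ⟨ih1, ih2⟩ := ih
    rw [List.reverse_cons, revB_append, ih2]
    by_cases hq : c = '"'
    · subst hq; simp [revB, gRef, ih1]
    · by_cases hb : c = '\\'
      · subst hb
        cases hf : (gRef rest).2 <;>
          simp [revB, gRef, hf, ih1, (by decide : ('\\' : Char) ≠ '"')]
      · simp [revB, gRef, hq, hb, ih1]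

theorem runA_gRef (l : List Char) : ∀ (k : Nat),
    (runA l k).flatten = List.replicate (if (gRef l).2 then k * 2 else k) '\\' ++ (gRef l).1 := by
  induction l with
  | nil => intro k; simp [runA, gRef]
  | cons c rest ih =>
    intro k
    by_cases hb : c = '\\'
    · subst hb
      have h2 : (k + 1) * 2 = k * 2 + 2 := by omega
      simp only [runA, gRef, if_true, if_neg (by decide : ¬ ('\\' : Char) = '"')]
      rw [ih]
      cases hf : (gRef rest).2 <;>
        first
        | simp [hf, h2, List.replicate_add, List.append_assoc]
        | simp [List.replicate_succ']
    · by_cases hq : c = '"'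
      · subst hq
        have h1 : 2 * k + 1 = k * 2 + 1 := by omega
        simp only [runA, gRef, if_true,
          if_neg (by decide : ¬ ('"' : Char) = '\\')]
        rw [List.flatten_cons, ih]
        cases hf : (gRef rest).2 <;>
          first
        | simp [hf, h1, List.replicate_succ', List.append_assoc]
        | simp [h1, List.replicate_succ', List.append_assoc]
      · simp [runA, gRef, hb, hq, ih]

-- ===== VERDICT (by name: the statement is the Claim_ definition above) =====
theorem double_quoted_spec : Claim_equal_double_quoted := by
  unfold Claim_equal_double_quoted
  intro s _
  unfold Spec_double_quoted double_quoted double_quoted_alt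
  rw [foldlB]
  have hA := foldlA s.toList 0 []
  simp only [List.nil_append] at hA
  rw [hA, runA_gRef, ← (revB_gRef s.toList).1]
  simp
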